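-- pv_equiv track=rewrite | github.com/xydxydxyd1/alias-recommendation | src/generate.py | generate_alias
-- ===== SOURCE A (Python) =====
-- def generate_alias(command, alias_len=4):
--     """Generate an alias for a command
--
--     alias_len -- the length of the generated alias. If one cannot be generated,
--     command is returned without whitespace.
--     """
--     words = command.split()
--     words = ["".join(filter(str.isalnum, word)) for word in words]
--
--     # List of beginning characters of each word to be used in the alias
--     word_heads = ["" for _ in range(len(words))]
--     current_alias_len = 0
--     out_of_characters = False
--     current_character_index = 0
--     while current_alias_len < alias_len and not out_of_characters:
--         out_of_characters = True
--         for word_index, word in enumerate(words):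
--             if current_character_index < len(word):
--                 out_of_characters = False
--                 word_heads[word_index] += word[current_character_index]
--                 current_alias_len += 1
--                 if current_alias_len >= alias_len:
--                     break
--         current_character_index += 1
--     return "".join(word_heads)
-- ===== SOURCE B (Python) =====
-- def generate_alias(command, alias_len=4):
--     """Generate an alias for a command (arithmetic distribution, no per-char loop)."""
--     words = ["".join(filter(str.isalnum, w)) for w in command.split()]
--     lens = [len(w) for w in words]
--     budget = alias_len if alias_len > 0 else 0
--     # largest number of full round-robin columns C whose chars fit in the budget
--     C = 0
--     while sum(min(l, C + 1) for l in lens) <= budget and any(l > C for l in lens):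
--         C += 1
--     rem = budget - sum(min(l, C) for l in lens)
--     parts = []
--     for w in words:
--         k = min(len(w), C)
--         if rem > 0 and len(w) > C:
--             k += 1
--             rem -= 1
--         parts.append(w[:k])
--     return "".join(parts)
-- ===== Notes on version B (the rewrite author's own statement) =====
-- stated objective: alternative
-- what changed: B replaces A's character-by-character round-robin simulation (outer column loop with an inner per-word loop and a mid-column break) by an arithmetic distribution: it finds the largest number of full columns C whose characters fit in the budget, gives one extra character to the first remaining words in index order, and slices each word once.
import Mathlib
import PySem

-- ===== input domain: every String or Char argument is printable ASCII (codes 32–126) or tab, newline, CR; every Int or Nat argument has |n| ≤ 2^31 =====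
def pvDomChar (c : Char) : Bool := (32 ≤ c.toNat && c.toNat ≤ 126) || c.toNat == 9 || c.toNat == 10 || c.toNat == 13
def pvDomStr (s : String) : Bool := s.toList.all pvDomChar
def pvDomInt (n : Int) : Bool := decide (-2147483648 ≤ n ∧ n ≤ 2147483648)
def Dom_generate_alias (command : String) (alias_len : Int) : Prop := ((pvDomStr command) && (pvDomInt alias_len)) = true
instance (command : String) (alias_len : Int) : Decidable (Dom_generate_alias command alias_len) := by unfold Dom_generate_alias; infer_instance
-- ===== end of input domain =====

-- B replaces A's char-by-char round-robin simulation by an arithmetic distribution: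
-- it computes the number of full columns and the remainder, then slices each word once ("alternative").

-- ===== PORT A =====
-- words cleaned exactly as A's comprehension: split on whitespace, keep alnum chars
def gaClean (command : String) : List (List Char) :=
  (PySem.Chars.split₀ command.toList).map (fun w => w.filter PySem.Chars.isalnum)

-- the inner `for word_index, word in enumerate(words)` loop with its possible break;
-- heads is walked in parallel with words (same index order as enumerate)
def gaInner : List (List Char) → List (List Char) → Nat → Int → Int → Bool →
    List (List Char) × Int × Bool
  | [], heads, _, curLen, _, out => (heads, curLen, out)
  | w :: ws, heads, c, curLen, aliasLen, out =>
    match heads with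
    | [] => ([], curLen, out)
    | h :: hs =>
      if hc : c < w.length then
        let h' := h ++ [w[c]]
        let curLen' := curLen + 1
        if curLen' ≥ aliasLen then
          (h' :: hs, curLen', false)
        else
          let r := gaInner ws hs c curLen' aliasLen false
          (h' :: r.1, r.2.1, r.2.2)
      else
        let r := gaInner ws hs c curLen aliasLen out
        (h :: r.1, r.2.1, r.2.2)

-- the outer while loop; fuel only makes it total (maxLen+2 iterations always suffice)
def gaOuter : Nat → List (List Char) → List (List Char) → Int → Int → Bool → Nat →
    List (List Char)
  | 0, _, heads, _, _, _, _ => heads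
  | fuel+1, words, heads, curLen, aliasLen, out, c =>
    if curLen < aliasLen ∧ out = false then
      let r := gaInner words heads c curLen aliasLen true
      gaOuter fuel words r.1 r.2.1 aliasLen r.2.2 (c+1)
    else heads

def gaMaxLen (ws : List (List Char)) : Nat := ws.foldl (fun m w => max m w.length) 0

def generate_alias (command : String) (alias_len : Int) : String :=
  let words := gaClean command
  let heads : List (List Char) := List.replicate words.length []
  String.mk (PySem.Chars.join []
    (gaOuter (gaMaxLen words + 2) words heads 0 alias_len false 0))

-- ===== PORT B =====
def gbClean (command : String) : List (List Char) :=
  (PySem.Chars.split₀ command.toList).map (fun w => w.filter PySem.Chars.isalnum)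

def gbMaxLen (lens : List Nat) : Nat := lens.foldl (fun m l => max m l) 0

-- the `while sum(min(l, C+1) for l in lens) <= budget and any(l > C for l in lens): C += 1`
-- loop; fuel only makes it total (maxLen+1 iterations always suffice)
def gbFindC : Nat → List Nat → Int → Nat → Nat
  | 0, _, _, C => C
  | fuel+1, lens, budget, C =>
    if ((lens.map (fun l => min l (C+1))).sum : Int) ≤ budget ∧
        lens.any (fun l => decide (C < l)) = true then
      gbFindC fuel lens budget (C+1)
    else C

-- the per-word slicing pass carrying the remainder
def gbParts : List (List Char) → Nat → Int → List (List Char)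
  | [], _, _ => []
  | w :: ws, C, rem =>
    let k := min w.length C
    if 0 < rem ∧ C < w.length then
      w.take (k+1) :: gbParts ws C (rem - 1)
    else
      w.take k :: gbParts ws C rem

def generate_alias_alt (command : String) (alias_len : Int) : String :=
  let words := gbClean command
  let lens := words.map List.length
  let budget : Int := if 0 < alias_len then alias_len else 0
  let C := gbFindC (gbMaxLen lens + 1) lens budget 0
  let rem := budget - ((lens.map (fun l => min l C)).sum : Int)
  String.mk (PySem.Chars.join [] (gbParts words C rem))

-- ===== PRECONDITION & SPEC =====
def Spec_generate_alias (command : String) (alias_len : Int) (out : String) : Prop := out = generate_alias_alt command alias_len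
instance (command : String) (alias_len : Int) (out : String) : Decidable (Spec_generate_alias command alias_len out) := by unfold Spec_generate_alias; infer_instance

-- ===== CLAIM (what is proved, stated in full; the proofs are below) =====
def Claim_equal_generate_alias : Prop := ∀ (command : String) (alias_len : Int), Dom_generate_alias command alias_len → Spec_generate_alias command alias_len (generate_alias command alias_len)

-- ===== LEMMAS AND PROOFS =====

-- proof-side abbreviations: chars used by the first c columns, and words still active at column c
def gaSc (ws : List (List Char)) (c : Nat) : Nat := (ws.map (fun w => min w.length c)).sum
def gaTks (ws : List (List Char)) (c : Nat) : Nat := ws.countP (fun w => decide (c < w.length))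
def gaCond (ws : List (List Char)) (b : Int) (c : Nat) : Prop :=
  (gaSc ws (c+1) : Int) ≤ b ∧ 0 < gaTks ws c

lemma gaSc_succ (ws : List (List Char)) (c : Nat) :
    gaSc ws (c+1) = gaSc ws c + gaTks ws c := by
  induction ws with
  | nil => simp [gaSc, gaTks]
  | cons w ws ih =>
    simp only [gaSc, gaTks, List.map_cons, List.sum_cons, List.countP_cons] at *
    by_cases h : c < w.length <;> simp [h] <;> omega

lemma take_min_self (w : List Char) (c : Nat) : w.take (min w.length c) = w.take c := by
  rcases Nat.le_total w.length c with h | h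
  · rw [min_eq_left h, List.take_length, List.take_of_length_le h]
  · rw [min_eq_right h]

lemma gbParts_zero (ws : List (List Char)) (c : Nat) (r : Int) (hr : r ≤ 0) :
    gbParts ws c r = ws.map (·.take c) := by
  induction ws with
  | nil => simp [gbParts]
  | cons w ws ih =>
    rw [gbParts]
    have : ¬ (0 < r ∧ c < w.length) := by omega
    simp only [if_neg this, List.map_cons, ih]
    rw [take_min_self]

lemma gbParts_full (ws : List (List Char)) (c : Nat) (r : Int)
    (hr : (gaTks ws c : Int) ≤ r) : gbParts ws c r = ws.map (·.take (c+1)) := by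
  induction ws generalizing r with
  | nil => simp [gbParts]
  | cons w ws ih =>
    rw [gbParts]
    simp only [gaTks, List.countP_cons] at hr ih ⊢
    by_cases h : c < w.length
    · have hmin : min w.length c = c := min_eq_right (by omega)
      rw [if_pos ⟨by simp [h] at hr; omega, h⟩, hmin, List.map_cons,
        ih (r - 1) (by simp [h] at hr; push_cast; omega)]
    · rw [if_neg (by tauto), List.map_cons, ih r (by simp [h] at hr; omega),
        take_min_self]
      congr 1
      rw [List.take_of_length_le (by omega), List.take_of_length_le (by omega)]

lemma gaInner_spec (ws : List (List Char)) (c : Nat) (curLen b : Int) (out : Bool)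
    (h : curLen < b) :
    gaInner ws (ws.map (·.take c)) c curLen b out =
      (gbParts ws c (b - curLen), min (curLen + gaTks ws c) b,
        out && decide (gaTks ws c = 0)) := by
  induction ws generalizing curLen out with
  | nil => simp [gaInner, gbParts, gaTks, min_eq_left (le_of_lt h)]
  | cons w ws ih =>
    simp only [List.map_cons, gaInner, gaTks, List.countP_cons] at *
    by_cases hc : c < w.length
    · rw [dif_pos hc]
      have htake : w.take c ++ [w[c]] = w.take (c+1) := by
        rw [List.take_succ, List.getElem?_eq_getElem hc]; rfl
      have hmin : min w.length c = c := min_eq_right (by omega)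
      simp only [hc, decide_true, if_true, gbParts]
      rw [if_pos (show 0 < b - curLen ∧ True from ⟨by omega, trivial⟩), hmin]
      by_cases hbrk : curLen + 1 ≥ b
      · rw [if_pos hbrk, gbParts_zero ws c (b - curLen - 1) (by omega)]
        simp only [Prod.mk.injEq]
        refine ⟨by rw [htake], by push_cast; omega, by simp⟩
      · rw [if_neg hbrk, ih (curLen + 1) false (by omega)]
        simp only [Prod.mk.injEq]
        refine ⟨by rw [htake, show b - (curLen + 1) = b - curLen - 1 from by omega], by push_cast; omega, by simp⟩
    · rw [dif_neg hc]
      rw [ih curLen out h]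
      simp only [hc, decide_false, Bool.false_eq_true, if_false, Nat.add_zero, gbParts]
      rw [if_neg (by tauto)]
      simp [take_min_self]

lemma gaOuter_out_true (fuel : Nat) (ws heads : List (List Char)) (curLen b : Int) (c : Nat) :
    gaOuter fuel ws heads curLen b true c = heads := by
  cases fuel <;> simp [gaOuter]

lemma gaOuter_done (fuel : Nat) (ws heads : List (List Char)) (curLen b : Int) (o : Bool)
    (c : Nat) (h : b ≤ curLen) : gaOuter fuel ws heads curLen b o c = heads := by
  cases fuel with
  | zero => rfl
  | succ n => rw [gaOuter, if_neg (by rintro ⟨h1, -⟩; omega)]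

lemma gbParts_congr (ws : List (List Char)) {c c' : Nat} {r r' : Int}
    (hc : c = c') (hr : r = r') : gbParts ws c r = gbParts ws c' r' := by
  subst hc; subst hr; rfl

lemma gaOuter_spec (ws : List (List Char)) (b : Int) :
    ∀ (k c fuel : Nat), k + 1 ≤ fuel →
    (∀ j, c ≤ j → j < c + k → gaCond ws b j) → ¬ gaCond ws b (c + k) →
    (gaSc ws c : Int) < b →
    gaOuter fuel ws (ws.map (·.take c)) (gaSc ws c) b false c =
      gbParts ws (c + k) (b - gaSc ws (c + k)) := by
  intro k
  induction k with
  | zero =>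
    intro c fuel hf _ hnc hlt
    obtain ⟨fuel, rfl⟩ : ∃ f, fuel = f + 1 := ⟨fuel - 1, by omega⟩
    rw [gaOuter, if_pos ⟨hlt, rfl⟩, gaInner_spec ws c _ b true hlt]
    simp only [Nat.add_zero] at hnc ⊢
    by_cases ht : gaTks ws c = 0
    · simp only [ht, decide_true, Bool.and_self]
      rw [gaOuter_out_true]
    · have hgt : b < (gaSc ws (c+1) : Int) := by
        by_contra hle
        exact hnc ⟨by omega, by omega⟩
      have : min (gaSc ws c + (gaTks ws c : Int)) b = b := by
        have := gaSc_succ ws c; push_cast at hgt ⊢; omega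
      rw [this]
      simp only [ht, decide_false, Bool.and_false]
      rw [gaOuter_done _ _ _ _ _ _ _ (le_refl b)]
  | succ k ih =>
    intro c fuel hf hcond hnc hlt
    obtain ⟨fuel, rfl⟩ : ∃ f, fuel = f + 1 := ⟨fuel - 1, by omega⟩
    have hc0 : gaCond ws b c := hcond c (le_refl c) (by omega)
    rw [gaOuter, if_pos ⟨hlt, rfl⟩, gaInner_spec ws c _ b true hlt]
    have htks : 0 < gaTks ws c := hc0.2
    have hle : (gaSc ws (c+1) : Int) ≤ b := hc0.1
    have hsucc := gaSc_succ ws c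
    have hmin : min (gaSc ws c + (gaTks ws c : Int)) b = (gaSc ws (c+1) : Int) := by
      push_cast; omega
    have hfull : gbParts ws c (b - (gaSc ws c : Int)) = ws.map (·.take (c+1)) :=
      gbParts_full ws c _ (by push_cast; omega)
    simp only [hmin, hfull]
    have hdec : decide (gaTks ws c = 0) = false := by simp; omega
    simp only [hdec, Bool.and_false]
    by_cases heq : (gaSc ws (c+1) : Int) = b
    · -- the budget is hit exactly at the end of this column: the loop exits now,
      -- and no further column can be affordable, so k = 0
      have hk0 : k = 0 := by
        by_contra hk
        have hc1 : gaCond ws b (c+1) := hcond (c+1) (by omega) (by omega)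
        have := gaSc_succ ws (c+1)
        have := hc1.1
        have := hc1.2
        omega
      subst hk0
      rw [gaOuter_done _ _ _ _ _ _ _ (le_of_eq heq.symm)]
      simp only [Nat.zero_add]
      rw [gbParts_zero ws (c + 1) _ (by omega)]
    · have hlt' : (gaSc ws (c+1) : Int) < b := lt_of_le_of_ne hle heq
      have e : c + 1 + k = c + (k + 1) := by omega
      rw [ih (c+1) fuel (by omega)
        (fun j hj1 hj2 => hcond j (by omega) (by omega))
        (by rw [e]; exact hnc) hlt']
      exact gbParts_congr ws e (by rw [e])

lemma gbFindC_sum (ws : List (List Char)) (C : Nat) :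
    ((ws.map List.length).map (fun l => min l C)).sum = gaSc ws C := by
  simp [gaSc, List.map_map, Function.comp_def]

lemma gbFindC_any (ws : List (List Char)) (c : Nat) :
    ((ws.map List.length).any (fun l => decide (c < l))) = true ↔ 0 < gaTks ws c := by
  simp only [List.any_map, List.any_eq_true, Function.comp_def, decide_eq_true_eq,
    gaTks, List.countP_pos_iff]

lemma gbFindC_spec (ws : List (List Char)) (b : Int) :
    ∀ (fuel c : Nat), (∀ j, gaCond ws b j → j < c + fuel) →
    (∀ j, c ≤ j → j < gbFindC fuel (ws.map List.length) b c → gaCond ws b j) ∧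
      ¬ gaCond ws b (gbFindC fuel (ws.map List.length) b c) ∧
      c ≤ gbFindC fuel (ws.map List.length) b c := by
  intro fuel
  induction fuel with
  | zero =>
    intro c hf
    simp only [gbFindC]
    exact ⟨fun j hj1 hj2 => absurd hj2 (by omega),
      fun hc => by have := hf _ hc; omega, le_refl c⟩
  | succ fuel ih =>
    intro c hf
    have hguard : (((((ws.map List.length).map (fun l => min l (c+1))).sum : Nat) : Int) ≤ b ∧
        (ws.map List.length).any (fun l => decide (c < l)) = true) ↔ gaCond ws b c := by
      rw [gbFindC_sum]
      exact and_congr Iff.rfl (gbFindC_any ws c)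
    rw [gbFindC]
    by_cases hc : gaCond ws b c
    · rw [if_pos (hguard.mpr hc)]
      obtain ⟨h1, h2, h3⟩ := ih (c+1) (fun j hj => by have := hf j hj; omega)
      refine ⟨?_, h2, by omega⟩
      intro j hj1 hj2
      rcases Nat.eq_or_lt_of_le hj1 with rfl | hj
      · exact hc
      · exact h1 j hj hj2
    · rw [if_neg (fun h => hc (hguard.mp h))]
      exact ⟨by omega, hc, le_refl c⟩

lemma le_foldl_max (lens : List Nat) : ∀ a, a ≤ lens.foldl (fun m l => max m l) a := by
  induction lens with
  | nil => intro a; simp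
  | cons l lens ih => intro a; exact le_trans (le_max_left a l) (ih (max a l))

lemma mem_le_foldl_max (lens : List Nat) : ∀ a l, l ∈ lens →
    l ≤ lens.foldl (fun m l => max m l) a := by
  induction lens with
  | nil => intro a l h; simp at h
  | cons x lens ih =>
    intro a l h
    rcases List.mem_cons.mp h with rfl | h
    · exact le_trans (le_max_right a l) (le_foldl_max lens (max a l))
    · exact ih (max a x) l h

lemma tks_lt_max (ws : List (List Char)) (c : Nat) (h : 0 < gaTks ws c) :
    c < gbMaxLen (ws.map List.length) := by
  simp only [gaTks] at h
  rw [List.countP_pos_iff] at h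
  obtain ⟨w, hw, hlt⟩ := h
  simp only [decide_eq_true_eq] at hlt
  have : w.length ≤ gbMaxLen (ws.map List.length) :=
    mem_le_foldl_max _ 0 w.length (List.mem_map_of_mem hw)
  omega

lemma replicate_eq_map_take_zero (ws : List (List Char)) :
    List.replicate ws.length ([] : List Char) = ws.map (·.take 0) := by
  induction ws with
  | nil => rfl
  | cons w ws ih =>
    simp only [List.length_cons, List.replicate_succ, ih, List.map_cons, List.take_zero]

-- ===== VERDICT (by name: the statement is the Claim_ definition above) =====
theorem generate_alias_spec : Claim_equal_generate_alias := by
  intro command alias_len _dom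
  simp only [Spec_generate_alias, generate_alias, generate_alias_alt]
  rw [show gbClean command = gaClean command from rfl]
  set ws := gaClean command with hws
  congr 1
  by_cases hpos : 0 < alias_len
  · rw [if_pos hpos]
    obtain ⟨hall, hnc, -⟩ := gbFindC_spec ws alias_len (gbMaxLen (ws.map List.length) + 1) 0
      (fun j hj => by have := tks_lt_max ws j hj.2; omega)
    set C := gbFindC (gbMaxLen (ws.map List.length) + 1) (ws.map List.length) alias_len 0 with hC
    have hCle : C ≤ gbMaxLen (ws.map List.length) := by
      by_contra hgt
      have hcond := hall (gbMaxLen (ws.map List.length)) (by omega) (by omega)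
      have := tks_lt_max ws _ hcond.2
      omega
    have hmaxeq : gbMaxLen (ws.map List.length) = gaMaxLen ws := by
      simp [gbMaxLen, gaMaxLen, List.foldl_map]
    have hsc0 : gaSc ws 0 = 0 := by simp [gaSc]
    have hres := gaOuter_spec ws alias_len C 0 (gaMaxLen ws + 2) (by omega)
      (fun j hj1 hj2 => hall j hj1 (by omega)) (by simpa using hnc)
      (by rw [hsc0]; exact_mod_cast hpos)
    simp only [hsc0, Nat.cast_zero, Nat.zero_add] at hres
    rw [replicate_eq_map_take_zero, hres, gbFindC_sum]
  · rw [if_neg hpos]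
    have hnone : ∀ j, ¬ gaCond ws (0:Int) j := by
      intro j ⟨h1, h2⟩
      have := gaSc_succ ws j
      omega
    have hC0 : gbFindC (gbMaxLen (ws.map List.length) + 1) (ws.map List.length) 0 0 = 0 := by
      by_contra h
      have := (gbFindC_spec ws 0 (gbMaxLen (ws.map List.length) + 1) 0
        (fun j hj => absurd hj (hnone j))).1 0 (le_refl 0) (by omega)
      exact hnone 0 this
    rw [hC0]
    have hrem : ((ws.map List.length).map (fun l => min l 0)).sum = 0 := by
      simp [Function.comp_def]
    rw [hrem]
    simp only [Nat.cast_zero, sub_zero]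
    rw [gbParts_zero ws 0 0 (le_refl 0)]
    obtain ⟨f, hf⟩ : ∃ f, gaMaxLen ws + 2 = f + 1 := ⟨gaMaxLen ws + 1, by omega⟩
    rw [hf, gaOuter, if_neg (by rintro ⟨h1, -⟩; omega)]
    rw [replicate_eq_map_take_zero]
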